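-- pv_equiv track=rewrite | github.com/Ag3ntOhm/IoT-S4 | 3_3_5_1/main.py | convert
-- ===== SOURCE A (Python) =====
-- def convert(Song) :
--     L = []
--     s = ""
--     i = 0
--     while i < len(Song) :
--         if (i != 0 and i % 4 == 0) :
--             L.append(s)
--             s = ""
--         t = Song[i]
--         if (t == ',') :
--             if (i % 2 != 1) :
--                 raise SyntaxError("Song invalid syntax")
--             if (len(s) == 1) :
--                 s+= '/'
--             i += 1
--         else :
--             s += Song[i]
--             i += 1
--     return L
-- ===== SOURCE B (Python) =====
-- def convert(Song):
--     # Chunk the song into 4-char groups, process each group independently,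
--     # then drop the never-flushed final group (as the original does).
--     chunks = []
--     rest = Song
--     while rest:
--         chunks.append(rest[:4])
--         rest = rest[4:]
--     results = []
--     k = 0
--     for chunk in chunks:
--         s = ""
--         i = 4 * k
--         for t in chunk:
--             if t == ',':
--                 if i % 2 == 0:
--                     raise SyntaxError("Song invalid syntax")
--                 if len(s) == 1:
--                     s += '/'
--             else:
--                 s += t
--             i += 1
--         results.append(s)
--         k += 1
--     return results[:-1]
-- ===== Notes on version B (the rewrite author's own statement) =====
-- stated objective: simpler
-- what changed: Replaces A's single indexed while-loop with interleaved flush logic by a three-stage decomposition: split the song into 4-char chunks, process each chunk independently into its group string (raising on a comma at an even global index), then return all results but the never-flushed last one via results[:-1].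
import Mathlib
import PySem

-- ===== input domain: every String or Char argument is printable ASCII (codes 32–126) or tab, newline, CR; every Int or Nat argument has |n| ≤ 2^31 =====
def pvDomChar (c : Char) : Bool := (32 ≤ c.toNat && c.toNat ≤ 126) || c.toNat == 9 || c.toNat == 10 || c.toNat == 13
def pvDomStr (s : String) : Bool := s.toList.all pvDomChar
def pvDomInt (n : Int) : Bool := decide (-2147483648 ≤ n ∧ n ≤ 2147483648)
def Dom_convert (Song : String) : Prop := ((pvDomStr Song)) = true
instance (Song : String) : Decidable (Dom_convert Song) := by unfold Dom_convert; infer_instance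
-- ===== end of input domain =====

-- B re-decomposes A's single indexed while-loop into: chunk into 4-char groups, process each
-- group independently, drop the never-flushed last group (objective: simpler decomposition).

-- ===== PORT A =====
-- literal port of A's while loop: remaining characters + absolute index i + (L, s) state
def convertLoop : List Char → Nat → List String → String → List String
  | [], _, L, _ => L
  | t :: rest, i, L, s =>
    let P : List String × String := if i ≠ 0 ∧ i % 4 = 0 then (L ++ [s], "") else (L, s)
    if t = ',' then
      if i % 2 ≠ 1 then []   -- raise SyntaxError("Song invalid syntax"); excluded by Pre_convert
      else convertLoop rest (i+1) P.1 (if P.2.length = 1 then P.2 ++ "/" else P.2)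
    else convertLoop rest (i+1) P.1 (P.2.push t)

def convert (Song : String) : List String := convertLoop Song.toList 0 [] ""

-- ===== PORT B =====
-- chunks: the while-loop peeling 4 characters at a time (rest[:4] / rest[4:])
def chunks4 (cs : List Char) : List (List Char) :=
  if h : cs = [] then [] else cs.take 4 :: chunks4 (cs.drop 4)
termination_by cs.length
decreasing_by
  have := List.length_pos_of_ne_nil h
  simp only [List.length_drop]; omega

-- inner for-loop over one chunk, i the running global index; none = raise SyntaxError
def procGo : List Char → Nat → String → Option String
  | [], _, s => some s
  | t :: rest, i, s =>
    if t = ',' then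
      if i % 2 = 0 then none
      else procGo rest (i+1) (if s.length = 1 then s ++ "/" else s)
    else procGo rest (i+1) (s.push t)

-- outer for-loop over the chunks, k the chunk counter, accumulating results
def outerGo : List (List Char) → Nat → List String → Option (List String)
  | [], _, results => some results
  | c :: chs, k, results =>
    match procGo c (4*k) "" with
    | none => none
    | some s => outerGo chs (k+1) (results ++ [s])

def convert_alt (Song : String) : List String :=
  match outerGo (chunks4 Song.toList) 0 [] with
  | some results => results.dropLast   -- results[:-1]
  | none => []                          -- raise path, excluded by Pre_convert

-- ===== PRECONDITION & SPEC =====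
-- Pre_convert excludes exactly the inputs with a comma at an even index, on which
-- A (and B) raise SyntaxError and return nothing.
def Pre_convert (Song : String) : Prop :=
  ∀ j, (h : j < Song.toList.length) → Song.toList[j] = ',' → j % 2 = 1
instance (Song : String) : Decidable (Pre_convert Song) := by unfold Pre_convert; infer_instance

def pvWitness_convert : String := "a,b,cde,"

def Spec_convert (Song : String) (out : List String) : Prop := out = convert_alt Song
instance (Song : String) (out : List String) : Decidable (Spec_convert Song out) := by unfold Spec_convert; infer_instance

-- ===== CLAIM (what is proved, stated in full; the proofs are below) =====
def Claim_equal_convert : Prop := ∀ (Song : String), Dom_convert Song → Pre_convert Song → Spec_convert Song (convert Song)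

-- ===== LEMMAS AND PROOFS =====

-- Pre_convert relativized: commas in cs sit at globally odd indices, cs starting at index i0
def PreRel (cs : List Char) (i0 : Nat) : Prop :=
  ∀ j, (h : j < cs.length) → cs[j] = ',' → (i0 + j) % 2 = 1

-- common functional core: what processing one segment does to s (raise-free by PreRel)
def innerSeg : List Char → Nat → String → String
  | [], _, s => s
  | t :: rest, i, s =>
    if t = ',' then innerSeg rest (i+1) (if s.length = 1 then s ++ "/" else s)
    else innerSeg rest (i+1) (s.push t)

-- the per-chunk results, chunk k first
def results_ (cs : List Char) (k : Nat) : List String :=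
  if h : cs = [] then [] else innerSeg (cs.take 4) (4*k) "" :: results_ (cs.drop 4) (k+1)
termination_by cs.length
decreasing_by
  have := List.length_pos_of_ne_nil h
  simp only [List.length_drop]; omega

theorem preRel_take (cs : List Char) (i m : Nat) (h : PreRel cs i) : PreRel (cs.take m) i := by
  intro j hj hc
  have hj' : j < cs.length := lt_of_lt_of_le hj (by simpa using (List.length_take_le m cs))
  exact h j hj' (by simpa [List.getElem_take] using hc)

theorem preRel_drop (cs : List Char) (i m : Nat) (h : PreRel cs i) : PreRel (cs.drop m) (i + m) := by
  intro j hj hc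
  have hj' : m + j < cs.length := by simp [List.length_drop] at hj; omega
  have := h (m + j) hj' (by simpa [List.getElem_drop] using hc)
  omega

theorem preRel_tail (t : Char) (cs : List Char) (i : Nat) (h : PreRel (t :: cs) i) :
    PreRel cs (i + 1) := by
  intro j hj hc
  have := h (j+1) (by simpa using Nat.succ_lt_succ hj) (by simpa using hc)
  omega

-- A's loop over a flush-free segment c computes innerSeg c
theorem loop_noflush (c : List Char) : ∀ (rest : List Char) (i : Nat) (L : List String) (s : String),
    (∀ j, j < c.length → ¬(i + j ≠ 0 ∧ (i + j) % 4 = 0)) → PreRel c i →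
    convertLoop (c ++ rest) i L s = convertLoop rest (i + c.length) L (innerSeg c i s) := by
  induction c with
  | nil => intro rest i L s _ _; simp [innerSeg]
  | cons t c' ih =>
    intro rest i L s hnf hpre
    have h0 : ¬(i ≠ 0 ∧ i % 4 = 0) := by simpa using hnf 0 (by simp)
    have hnf' : ∀ j, j < c'.length → ¬(i + 1 + j ≠ 0 ∧ (i + 1 + j) % 4 = 0) := by
      intro j hj
      have := hnf (j+1) (by simpa using Nat.succ_lt_succ hj)
      omega
    by_cases ht : t = ','
    · have hodd : i % 2 = 1 := by
        have := hpre 0 (by simp) (by simpa using ht)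
        simpa using this
      simp only [List.cons_append, convertLoop, h0, if_false, ht, if_pos rfl, hodd]
      simp only [innerSeg, ht, if_pos rfl]
      rw [ih rest (i+1) L _ hnf' (preRel_tail t c' i hpre)]
      simp [Nat.add_comm, Nat.add_assoc, Nat.add_left_comm]
    · simp only [List.cons_append, convertLoop, h0, if_false, ht]
      simp only [innerSeg, ht, if_false]
      rw [ih rest (i+1) L _ hnf' (preRel_tail t c' i hpre)]
      simp [Nat.add_comm, Nat.add_assoc, Nat.add_left_comm]

-- one chunk step of A's loop at a flush boundary i ≠ 0
theorem loop_step (cs : List Char) (i : Nat) (L : List String) (s : String)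
    (hne : cs ≠ []) (hi0 : i ≠ 0) (hi4 : i % 4 = 0) (hpre : PreRel cs i) :
    convertLoop cs i L s
      = convertLoop (cs.drop 4) (i + (cs.take 4).length) (L ++ [s]) (innerSeg (cs.take 4) i "") := by
  obtain ⟨t, rest, rfl⟩ := List.exists_cons_of_ne_nil hne
  have ht : t ≠ ',' := by
    intro h
    have := hpre 0 (by simp) (by simpa using h)
    omega
  have hnf : ∀ j, j < (rest.take 3).length → ¬(i + 1 + j ≠ 0 ∧ (i + 1 + j) % 4 = 0) := by
    intro j hj
    have : j < 3 := lt_of_lt_of_le hj (by simpa using List.length_take_le 3 rest)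
    omega
  have hp : PreRel (rest.take 3) (i + 1) := preRel_take _ _ _ (preRel_tail t rest i hpre)
  rw [show convertLoop (t :: rest) i L s = convertLoop rest (i+1) (L ++ [s]) ("".push t) from by
    simp [convertLoop, if_pos (And.intro hi0 hi4), ht]]
  conv_lhs => rw [← List.take_append_drop 3 rest]
  rw [loop_noflush (rest.take 3) (rest.drop 3) (i+1) (L ++ [s]) _ hnf hp]
  simp only [innerSeg, ht, if_neg, List.drop_succ_cons, List.take_succ_cons, List.length_cons,
    List.length_take]
  congr 1
  omega

-- one chunk step of A's loop at i = 0 (no flush)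
theorem loop_step0 (cs : List Char) (L : List String) (s : String) (hpre : PreRel cs 0) :
    convertLoop cs 0 L s
      = convertLoop (cs.drop 4) ((cs.take 4).length) L (innerSeg (cs.take 4) 0 s) := by
  rcases cs with _ | ⟨t, rest⟩
  · simp [convertLoop, innerSeg]
  · have ht : t ≠ ',' := by
      intro h
      have := hpre 0 (by simp) (by simpa using h)
      omega
    have hnf : ∀ j, j < (rest.take 3).length → ¬(0 + 1 + j ≠ 0 ∧ (0 + 1 + j) % 4 = 0) := by
      intro j hj
      have : j < 3 := lt_of_lt_of_le hj (by simpa using List.length_take_le 3 rest)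
      omega
    have hp : PreRel (rest.take 3) (0 + 1) := preRel_take _ _ _ (preRel_tail t rest 0 hpre)
    rw [show convertLoop (t :: rest) 0 L s = convertLoop rest (0+1) L (s.push t) from by
      simp [convertLoop, ht]]
    conv_lhs => rw [← List.take_append_drop 3 rest]
    rw [loop_noflush (rest.take 3) (rest.drop 3) (0+1) L _ hnf hp]
    simp only [innerSeg, ht, if_neg, List.drop_succ_cons, List.take_succ_cons, List.length_cons,
      List.length_take]
    congr 1
    omega

-- A's loop from a flush boundary equals the append/dropLast form
theorem loop_main (n : Nat) : ∀ (cs : List Char) (k : Nat) (L : List String) (s : String),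
    cs.length ≤ n → PreRel cs (4*(k+1)) →
    convertLoop cs (4*(k+1)) L s = L ++ (s :: results_ cs (k+1)).dropLast := by
  induction n with
  | zero =>
    intro cs k L s hn _
    have hcs : cs = [] := List.eq_nil_of_length_eq_zero (Nat.le_zero.mp hn)
    subst hcs
    rw [results_]; simp [convertLoop]
  | succ n ih =>
    intro cs k L s hn hpre
    by_cases hcs : cs = []
    · subst hcs; rw [results_]; simp [convertLoop]
    · rw [loop_step cs (4*(k+1)) L s hcs (by omega) (by omega) hpre]
      by_cases hd : cs.drop 4 = []
      · rw [hd, results_]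
        simp only [dif_neg hcs]
        rw [show results_ (cs.drop 4) (k+1+1) = [] from by rw [hd, results_]; simp]
        simp [convertLoop, List.dropLast]
      · have hlen4 : 4 < cs.length := by
          by_contra hle
          exact hd (List.drop_eq_nil_of_le (by omega))
        have h4 : (cs.take 4).length = 4 := by
          simp only [List.length_take]; omega
        have hpre' : PreRel (cs.drop 4) (4*(k+1+1)) := by
          have := preRel_drop cs (4*(k+1)) 4 hpre
          have he : 4*(k+1) + 4 = 4*(k+1+1) := by ring
          rwa [he] at this
        have hlen : (cs.drop 4).length ≤ n := by
          simp only [List.length_drop]; omega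
        rw [h4, show 4*(k+1) + 4 = 4*((k+1)+1) by ring,
          ih (cs.drop 4) (k+1) (L ++ [s]) _ hlen hpre']
        rw [show results_ cs (k+1)
            = innerSeg (cs.take 4) (4*(k+1)) "" :: results_ (cs.drop 4) (k+1+1) from by
          conv_lhs => rw [results_]
          simp [hcs]]
        have hres : results_ (cs.drop 4) (k+1+1) ≠ [] := by
          rw [results_]; simp [hd]
        rcases hr : results_ (cs.drop 4) (k+1+1) with _ | ⟨r, rs⟩
        · exact absurd hr hres
        · simp [List.dropLast_cons₂]

theorem convert_eq_results (Song : String) (hpre : Pre_convert Song) :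
    convert Song = (results_ Song.toList 0).dropLast := by
  have h : PreRel Song.toList 0 := by
    intro j hj hc
    simpa using hpre j hj hc
  unfold convert
  by_cases hcs : Song.toList = []
  · rw [hcs, results_]; simp [convertLoop]
  · rw [loop_step0 Song.toList [] "" (by simpa using h)]
    by_cases hd : Song.toList.drop 4 = []
    · rw [hd, results_]
      simp only [dif_neg hcs]
      rw [show results_ (Song.toList.drop 4) (0+1) = [] from by rw [hd, results_]; simp]
      simp [convertLoop, List.dropLast]
    · have hlen4 : 4 < Song.toList.length := by
        by_contra hle
        exact hd (List.drop_eq_nil_of_le (by omega))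
      have h4 : (Song.toList.take 4).length = 4 := by
        simp only [List.length_take]; omega
      have hpre' : PreRel (Song.toList.drop 4) (4*(0+1)) := by
        have := preRel_drop Song.toList 0 4 h
        simpa using this
      have hm := loop_main (Song.toList.drop 4).length (Song.toList.drop 4) 0 []
        (innerSeg (Song.toList.take 4) 0 "") le_rfl hpre'
      rw [show (4:Nat)*(0+1) = 4 from by norm_num] at hm
      rw [h4, hm]
      rw [show results_ Song.toList 0
          = innerSeg (Song.toList.take 4) (4*0) "" :: results_ (Song.toList.drop 4) (0+1) from by
        conv_lhs => rw [results_]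
        simp [hcs]]
      have hres : results_ (Song.toList.drop 4) (0+1) ≠ [] := by
        rw [results_]; simp [hd]
      rcases hr : results_ (Song.toList.drop 4) (0+1) with _ | ⟨r, rs⟩
      · exact absurd hr hres
      · simp [List.dropLast_cons₂]

-- B's innerSeg loop never raises under PreRel and computes innerSeg
theorem procGo_eq (c : List Char) : ∀ (i : Nat) (s : String), PreRel c i →
    procGo c i s = some (innerSeg c i s) := by
  induction c with
  | nil => intro i s _; simp [procGo, innerSeg]
  | cons t c' ih =>
    intro i s hpre
    by_cases ht : t = ','
    · have hodd : i % 2 = 1 := by simpa using hpre 0 (by simp) (by simpa using ht)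
      simp only [procGo, innerSeg, ht, if_pos rfl, hodd]
      exact ih _ _ (preRel_tail t c' i hpre)
    · simp only [procGo, innerSeg, ht, if_false]
      exact ih _ _ (preRel_tail t c' i hpre)

-- B's outer loop accumulates exactly results_
theorem outerGo_eq (n : Nat) : ∀ (cs : List Char) (k : Nat) (res : List String),
    cs.length ≤ n → PreRel cs (4*k) →
    outerGo (chunks4 cs) k res = some (res ++ results_ cs k) := by
  induction n with
  | zero =>
    intro cs k res hn _
    have : cs = [] := List.eq_nil_of_length_eq_zero (Nat.le_zero.mp hn)
    subst this
    rw [chunks4, results_]; simp [outerGo]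
  | succ n ih =>
    intro cs k res hn hpre
    by_cases hcs : cs = []
    · subst hcs; rw [chunks4, results_]; simp [outerGo]
    · rw [chunks4, results_]
      simp only [hcs, dif_neg, not_false_iff]
      rw [outerGo, procGo_eq _ _ _ (preRel_take cs (4*k) 4 hpre)]
      dsimp only
      have hlen : (cs.drop 4).length ≤ n := by
        have := List.length_pos_of_ne_nil hcs
        simp only [List.length_drop]; omega
      have hpre' : PreRel (cs.drop 4) (4*(k+1)) := by
        have := preRel_drop cs (4*k) 4 hpre
        simpa [Nat.mul_succ] using this
      rw [ih (cs.drop 4) (k+1) (res ++ [innerSeg (cs.take 4) (4*k) ""]) hlen hpre']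
      simp

theorem convert_alt_eq_results (Song : String) (hpre : Pre_convert Song) :
    convert_alt Song = (results_ Song.toList 0).dropLast := by
  have h : PreRel Song.toList 0 := by
    intro j hj hc; simpa using hpre j hj hc
  unfold convert_alt
  rw [outerGo_eq Song.toList.length Song.toList 0 [] le_rfl (by simpa using h)]
  simp

-- ===== VERDICT (by name: the statement is the Claim_ definition above) =====
theorem convert_spec : Claim_equal_convert := by
  intro Song _ hpre
  unfold Spec_convert
  rw [convert_eq_results Song hpre, convert_alt_eq_results Song hpre]
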